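-- pv_equiv track=rewrite | github.com/DinoYoda/Cookie-Run-Builds | import_wiki_status_icons.py | site_status_icon_basename
-- ===== SOURCE A (Python) =====
-- def site_status_icon_basename(status_id: str) -> str:
--     """Match char-ui.js segment casing for status_* icon filenames."""
--     parts = status_id.split("_")
--     out: list[str] = []
--     for w in parts:
--         if not w:
--             out.append(w)
--         else:
--             out.append(w[0].upper() + w[1:])
--     return "_".join(out)
-- ===== SOURCE B (Python) =====
-- def site_status_icon_basename(status_id: str) -> str:
--     """Match char-ui.js segment casing for status_* icon filenames."""
--     out: list[str] = []
--     at_start = True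
--     for c in status_id:
--         out.append(c.upper() if at_start else c)
--         at_start = (c == "_")
--     return "".join(out)
-- ===== Notes on version B (the rewrite author's own statement) =====
-- stated objective: alternative
-- what changed: Replaces split-into-segments / per-segment capitalize / rejoin with a single left-to-right character scan that tracks a segment-start flag, never building the list of parts.
import Mathlib
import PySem

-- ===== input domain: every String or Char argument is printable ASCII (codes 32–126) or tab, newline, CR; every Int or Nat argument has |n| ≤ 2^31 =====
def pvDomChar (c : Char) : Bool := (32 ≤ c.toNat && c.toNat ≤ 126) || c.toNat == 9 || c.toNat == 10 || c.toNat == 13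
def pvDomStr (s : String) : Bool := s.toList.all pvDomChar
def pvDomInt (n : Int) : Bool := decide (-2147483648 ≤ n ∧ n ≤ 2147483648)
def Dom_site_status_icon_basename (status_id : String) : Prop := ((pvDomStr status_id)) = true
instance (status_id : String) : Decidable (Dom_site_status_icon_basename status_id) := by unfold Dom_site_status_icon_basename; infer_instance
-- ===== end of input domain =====

-- B replaces split/capitalize-each-segment/rejoin with a single character scan keeping a
-- segment-start flag (alternative decomposition, same cost).

-- ===== PORT A =====
-- one iteration of A's loop body: '' stays, otherwise w[0].upper() + w[1:]
def pvCapSeg (w : List Char) : List Char :=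
  if w.isEmpty then w
  else
    match PySem.List.pyGet? w 0 with
    | some c => PySem.Chars.upper [c] ++ PySem.List.slice w (some 1) none
    | none => []   -- unreachable: w is nonempty

def site_status_icon_basename (status_id : String) : String :=
  let parts := PySem.Chars.splitOn status_id.toList ['_']
  let out := parts.foldl (fun acc w => acc ++ [pvCapSeg w]) ([] : List (List Char))
  String.mk (PySem.Chars.join ['_'] out)

-- ===== PORT B =====
def site_status_icon_basename_alt (status_id : String) : String :=
  let r := status_id.toList.foldl
    (fun (st : List Char × Bool) c =>
      (st.1 ++ (if st.2 then PySem.Chars.upper [c] else [c]), c == '_'))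
    (([] : List Char), true)
  String.mk r.1

-- ===== PRECONDITION & SPEC =====
def Spec_site_status_icon_basename (status_id : String) (out : String) : Prop := out = site_status_icon_basename_alt status_id
instance (status_id : String) (out : String) : Decidable (Spec_site_status_icon_basename status_id out) := by unfold Spec_site_status_icon_basename; infer_instance

-- ===== CLAIM (what is proved, stated in full; the proofs are below) =====
def Claim_equal_site_status_icon_basename : Prop := ∀ (status_id : String), Dom_site_status_icon_basename status_id → Spec_site_status_icon_basename status_id (site_status_icon_basename status_id)

-- ===== LEMMAS AND PROOFS =====

-- the value B's scan produces from flag b over the remaining characters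
def pvCapScan : Bool → List Char → List Char
  | _, [] => []
  | b, c :: rest => (if b then PySem.Chars.upper [c] else [c]) ++ pvCapScan (c == '_') rest

theorem pvCapSeg_nil : pvCapSeg [] = [] := rfl

theorem pvCapSeg_cons (c : Char) (t : List Char) :
    pvCapSeg (c :: t) = PySem.Chars.upperChar c :: t := by
  simp [pvCapSeg, PySem.List.pyGet?, PySem.List.pyIdx?, PySem.Chars.upper,
        PySem.List.slice_from]

theorem go_ne_nil (fuel : Nat) (l cur : List Char) (acc : List (List Char)) :
    PySem.Chars.splitOn.go ['_'] fuel l cur acc ≠ [] := by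
  induction fuel generalizing l cur acc with
  | zero => simp [PySem.Chars.splitOn.go]
  | succ n ih =>
    cases l with
    | nil => simp [PySem.Chars.splitOn.go]
    | cons c rest =>
      simp only [PySem.Chars.splitOn.go]
      split
      · exact ih _ _ _
      · exact ih _ _ _

theorem go_acc (fuel : Nat) (l cur : List Char) (acc : List (List Char)) :
    PySem.Chars.splitOn.go ['_'] fuel l cur acc
      = acc.reverse ++ PySem.Chars.splitOn.go ['_'] fuel l cur [] := by
  induction fuel generalizing l cur acc with
  | zero => simp [PySem.Chars.splitOn.go]
  | succ n ih =>
    cases l with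
    | nil => simp [PySem.Chars.splitOn.go]
    | cons c rest =>
      simp only [PySem.Chars.splitOn.go]
      split
      · rw [ih _ _ (cur.reverse :: acc), ih _ _ ([cur.reverse])]
        simp
      · exact ih _ _ _

theorem join_map_go (l : List Char) (fuel : Nat) (cur : List Char)
    (h : l.length ≤ fuel) :
    PySem.Chars.join ['_'] ((PySem.Chars.splitOn.go ['_'] fuel l cur []).map pvCapSeg)
      = if cur.isEmpty then pvCapScan true l
        else pvCapSeg cur.reverse ++ pvCapScan false l := by
  induction l generalizing fuel cur with
  | nil =>
    have hgo : PySem.Chars.splitOn.go ['_'] fuel [] cur [] = [cur.reverse] := by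
      cases fuel <;> simp [PySem.Chars.splitOn.go]
    rw [hgo]
    cases cur with
    | nil => simp [PySem.Chars.join_singleton, pvCapSeg_nil, pvCapScan]
    | cons d t => simp [PySem.Chars.join_singleton, pvCapScan]
  | cons c rest ih =>
    cases fuel with
    | zero => simp at h
    | succ n =>
      have hn : rest.length ≤ n := by simpa using h
      by_cases hc : c = '_'
      · subst hc
        have hstep : PySem.Chars.splitOn.go ['_'] (n+1) ('_' :: rest) cur []
            = cur.reverse :: PySem.Chars.splitOn.go ['_'] n rest [] [] := by
          simp only [PySem.Chars.splitOn.go]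
          rw [if_pos (by simp [List.isPrefixOf])]
          rw [go_acc n _ _ _]
          simp
        rw [hstep]
        obtain ⟨q, qs, hq⟩ := List.exists_cons_of_ne_nil (go_ne_nil n rest [] [])
        have hrest := ih n [] hn
        rw [hq] at hrest ⊢
        rw [List.map_cons] at hrest
        simp only [List.isEmpty_nil, if_pos] at hrest
        simp only [List.map_cons, PySem.Chars.join_cons_cons]
        rw [hrest]
        have hu : PySem.Chars.upper ['_'] = ['_'] := by decide
        cases cur with
        | nil =>
          simp only [List.reverse_nil, pvCapSeg_nil, List.isEmpty_nil, if_pos,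
            List.nil_append]
          have : pvCapScan true ('_' :: rest)
              = PySem.Chars.upper ['_'] ++ pvCapScan true rest := by
            simp [pvCapScan]
          rw [this, hu]
        | cons d t =>
          rw [if_neg (by simp)]
          have : pvCapScan false ('_' :: rest) = '_' :: pvCapScan true rest := by
            simp [pvCapScan]
          rw [this]
          simp
      · have hstep : PySem.Chars.splitOn.go ['_'] (n+1) (c :: rest) cur []
            = PySem.Chars.splitOn.go ['_'] n rest (c :: cur) [] := by
          simp only [PySem.Chars.splitOn.go]
          rw [if_neg (by simp [List.isPrefixOf]; exact fun h => hc h.symm)]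
        have hcf : (c == '_') = false := by simp [hc]
        have hscan : pvCapScan false (c :: rest) = c :: pvCapScan false rest := by
          simp [pvCapScan, hcf]
        rw [hstep, ih n (c :: cur) hn]
        rw [if_neg (by simp)]
        cases cur with
        | nil =>
          rw [if_pos (by simp)]
          have h1 : pvCapSeg [c] = [PySem.Chars.upperChar c] := by
            simpa using pvCapSeg_cons c []
          have h2 : pvCapScan true (c :: rest)
              = PySem.Chars.upper [c] ++ pvCapScan (c == '_') rest := by
            simp [pvCapScan]
          rw [h2, hcf]
          simp only [List.reverse_cons, List.reverse_nil, List.nil_append, h1]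
          simp [PySem.Chars.upper]
        | cons d t =>
          rw [if_neg (by simp)]
          rw [show (c :: d :: t).reverse = (d :: t).reverse ++ [c] from by simp]
          obtain ⟨h0, tt, hrev⟩ :=
            List.exists_cons_of_ne_nil (l := (d :: t).reverse) (by simp)
          rw [hrev]
          have h1 : pvCapSeg ((h0 :: tt) ++ [c])
              = PySem.Chars.upperChar h0 :: (tt ++ [c]) := by
            simpa using pvCapSeg_cons h0 (tt ++ [c])
          rw [List.cons_append] at h1 ⊢
          rw [h1, pvCapSeg_cons, hscan]
          simp

theorem splitOn_cap (l : List Char) :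
    PySem.Chars.join ['_'] ((PySem.Chars.splitOn l ['_']).map pvCapSeg)
      = pvCapScan true l := by
  have := join_map_go l (l.length + 1) [] (by omega)
  simpa [PySem.Chars.splitOn] using this

theorem foldl_append_map (ps : List (List Char)) (acc : List (List Char)) :
    ps.foldl (fun acc w => acc ++ [pvCapSeg w]) acc = acc ++ ps.map pvCapSeg := by
  induction ps generalizing acc with
  | nil => simp
  | cons p ps ih => simp [List.foldl_cons, ih]

theorem scan_foldl (l : List Char) (acc : List Char) (b : Bool) :
    (l.foldl
      (fun (st : List Char × Bool) c =>
        (st.1 ++ (if st.2 then PySem.Chars.upper [c] else [c]), c == '_'))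
      (acc, b)).1 = acc ++ pvCapScan b l := by
  induction l generalizing acc b with
  | nil => simp [pvCapScan]
  | cons c rest ih => simp [List.foldl_cons, ih, pvCapScan]

-- ===== VERDICT (by name: the statement is the Claim_ definition above) =====
theorem site_status_icon_basename_spec : Claim_equal_site_status_icon_basename := by
  intro s _
  unfold Spec_site_status_icon_basename site_status_icon_basename site_status_icon_basename_alt
  simp only [foldl_append_map, List.nil_append, scan_foldl, splitOn_cap]
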